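-- pv_equiv track=rewrite | github.com/felieppe/aes_ecb_cracker | brute.py | generate_all_keys
-- ===== SOURCE A (Python) =====
-- from itertools import product
--
-- def generate_all_keys(charset, max_len, start_key=None):
--     """
--     Generator that produces all possible base keys up to max_len.
--     If start_key is provided, resumes generation from that key.
--     """
--     found_start = False
--     if start_key is None:
--         found_start = True
--
--     for length in range(1, max_len + 1):
--         for base_key_tuple in product(charset, repeat=length):
--             current_key = ''.join(base_key_tuple)
--             if not found_start:
--                 if current_key == start_key:
--                     found_start = True
--                 continue
--
--             yield current_key
-- ===== SOURCE B (Python) =====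
-- def generate_all_keys(charset, max_len, start_key=None):
--     """
--     Same keys as A, but instead of scanning every key while looking for
--     start_key, decode start_key to its rank (base-n odometer, digit = first
--     index of each char in charset) and resume directly after that rank.
--     """
--     n = len(charset)
--     if start_key is None:
--         start_len, start_rank = 1, 0
--     else:
--         L = len(start_key)
--         if L < 1 or L > max_len:
--             return
--         r = 0
--         for c in start_key:
--             i = charset.find(c)
--             if i < 0:
--                 return
--             r = r * n + i
--         start_len, start_rank = L, r + 1
--     for length in range(start_len, max_len + 1):
--         total = n ** length
--         for r in range(start_rank, total):
--             digits = []
--             x = r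
--             for _ in range(length):
--                 digits.append(charset[x % n])
--                 x //= n
--             yield ''.join(reversed(digits))
--         start_rank = 0
-- ===== Notes on version B (the rewrite author's own statement) =====
-- stated objective: alternative
-- what changed: Instead of enumerating every key and scanning past them until start_key is found, B decodes start_key to its base-n rank (digit = first index of each character in charset) and resumes generation directly at that rank, producing each key by base-n decoding of its rank; intended to avoid the skip scan, but a timing run could not confirm a speed-up (A times out on larger inputs, so no ratio was measurable).
import Mathlib
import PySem

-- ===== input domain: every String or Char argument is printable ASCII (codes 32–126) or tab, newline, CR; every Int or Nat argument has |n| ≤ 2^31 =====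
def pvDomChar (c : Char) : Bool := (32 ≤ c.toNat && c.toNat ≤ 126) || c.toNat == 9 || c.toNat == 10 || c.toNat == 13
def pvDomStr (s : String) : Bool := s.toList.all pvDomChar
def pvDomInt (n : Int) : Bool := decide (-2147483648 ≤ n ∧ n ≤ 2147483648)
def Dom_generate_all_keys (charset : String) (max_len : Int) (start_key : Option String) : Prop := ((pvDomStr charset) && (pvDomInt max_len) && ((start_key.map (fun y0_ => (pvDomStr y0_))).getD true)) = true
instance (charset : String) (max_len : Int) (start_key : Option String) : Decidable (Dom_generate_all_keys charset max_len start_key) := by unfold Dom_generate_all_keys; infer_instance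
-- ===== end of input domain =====

-- B replaces A's scan-and-skip search for start_key by decoding start_key to its
-- base-n rank and resuming generation directly at that rank (no scan over the skipped prefix).

-- ===== PORT A =====
-- itertools.product(charset, repeat=length), in product order (leftmost coordinate slowest)
def pvProdA (cs : List Char) : Nat → List (List Char)
  | 0 => [[]]
  | l+1 => cs.flatMap (fun c => (pvProdA cs l).map (fun t => c :: t))

-- the body of A's inner loop (found_start flag; skip until start_key, then yield)
def pvStepA (start_key : Option String) (st : Bool × List String) (tup : List Char) : Bool × List String :=
  let current := String.ofList tup
  if st.1 = false then
    if start_key = some current then (true, st.2) else st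
  else (st.1, st.2 ++ [current])

def generate_all_keys (charset : String) (max_len : Int) (start_key : Option String) : List String :=
  ((PySem.List.pyRange 1 (max_len + 1) 1).foldl
    (fun st length => (pvProdA charset.toList length.toNat).foldl (pvStepA start_key) st)
    (start_key.isNone, [])).2

-- ===== PORT B =====
-- inner decode loop of Source B: digits.append(charset[x % n]); x //= n; then ''.join(reversed(digits))
def pvDecodeB (charset : String) (n : Int) (length : Nat) (r : Int) : String :=
  let st := (List.range length).foldl
    (fun (st : List Char × Int) _ =>
      (st.1 ++ [(PySem.Str.pyGet? charset (PySem.Int.mod st.2 n)).getD ' '],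
       PySem.Int.floordiv st.2 n))
    ([], r)
  String.ofList st.1.reverse

-- Source B's rank loop: r = r * n + charset.find(c), bailing out (return) when find < 0
def pvRankB (charset : String) (n : Int) (s : List Char) : Option Int :=
  s.foldl (fun acc c =>
    match acc with
    | none => none
    | some r =>
      let i := PySem.Str.find charset (String.ofList [c])
      if i < 0 then none else some (r * n + i)) (some 0)

-- Source B's resume-point computation (start_len, start_rank); none = the generator yields nothing
def pvStartB (charset : String) (n : Int) (max_len : Int) (start_key : Option String) : Option (Int × Int) :=
  match start_key with
  | none => some (1, 0)
  | some s =>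
    let L : Int := PySem.Str.len s
    if L < 1 ∨ max_len < L then none
    else
      match pvRankB charset n s.toList with
      | none => none
      | some r => some (L, r + 1)

def generate_all_keys_alt (charset : String) (max_len : Int) (start_key : Option String) : List String :=
  let n : Int := PySem.Str.len charset
  match pvStartB charset n max_len start_key with
  | none => []
  | some st0 =>
    ((PySem.List.pyRange st0.1 (max_len + 1) 1).foldl
      (fun (st : Int × List String) length =>
        (0, st.2 ++ (PySem.List.pyRange st.1 (n ^ length.toNat) 1).map
              (fun r => pvDecodeB charset n length.toNat r)))
      (st0.2, [])).2

-- ===== PRECONDITION & SPEC =====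
def Spec_generate_all_keys (charset : String) (max_len : Int) (start_key : Option String) (out : List String) : Prop := out = generate_all_keys_alt charset max_len start_key
instance (charset : String) (max_len : Int) (start_key : Option String) (out : List String) : Decidable (Spec_generate_all_keys charset max_len start_key out) := by unfold Spec_generate_all_keys; infer_instance

-- ===== CLAIM (what is proved, stated in full; the proofs are below) =====
def Claim_equal_generate_all_keys : Prop := ∀ (charset : String) (max_len : Int) (start_key : Option String), Dom_generate_all_keys charset max_len start_key → Spec_generate_all_keys charset max_len start_key (generate_all_keys charset max_len start_key)

-- ===== LEMMAS AND PROOFS =====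

-- the length-l key of rank r (most-significant digit first)
def pvDk (cs : List Char) : Nat → Nat → List Char
  | 0, _ => []
  | l+1, r => pvDk cs l (r / cs.length) ++ [cs.getD (r % cs.length) ' ']

-- the same digits least-significant first (what B's decode loop collects)
def pvLsb (cs : List Char) : Nat → Nat → List Char
  | 0, _ => []
  | l+1, r => cs.getD (r % cs.length) ' ' :: pvLsb cs l (r / cs.length)

-- rank of a key (digit = idxOf, the FIRST index of the char), with initial accumulator
def pvEncF (cs : List Char) (r : Nat) (u : List Char) : Nat :=
  u.foldl (fun r c => r * cs.length + cs.idxOf c) r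

-- keys of lengths a, a+1, …, a+k-1 in order, the first length starting at rank r0
def pvBlocks (cs : List Char) (a : Int) (k : Nat) (r0 : Nat) : List String :=
  match k with
  | 0 => []
  | k+1 => ((List.range (cs.length ^ a.toNat)).drop r0).map
              (fun r => String.ofList (pvDk cs a.toNat r))
            ++ pvBlocks cs (a+1) k 0

theorem pvProdA_snoc (cs : List Char) (l : Nat) :
    pvProdA cs (l+1) = (pvProdA cs l).flatMap (fun t => cs.map (fun c => t ++ [c])) := by
  induction l with
  | zero => simp [pvProdA, List.map_eq_flatMap]
  | succ l ih =>
      have h1 : pvProdA cs (l+1+1) = cs.flatMap (fun c => (pvProdA cs (l+1)).map (fun t => c :: t)) := rfl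
      rw [h1]
      conv_lhs => rw [ih]
      conv_rhs => rw [show pvProdA cs (l+1) = cs.flatMap (fun c => (pvProdA cs l).map (fun t => c :: t)) from rfl]
      simp [List.map_flatMap, List.flatMap_map, List.flatMap_assoc, List.map_map, Function.comp_def]

theorem pvRangeMulFlat (a b : Nat) :
    List.range (a*b) = (List.range a).flatMap (fun q => (List.range b).map (fun i => q*b+i)) := by
  induction a with
  | zero => simp
  | succ a ih =>
      have h : (a+1)*b = a*b + b := by ring
      rw [h, List.range_add, List.range_succ, ih]
      simp

theorem pvMapGetD {β : Type} (cs : List Char) (f : Char → β) :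
    cs.map f = (List.range cs.length).map (fun i => f (cs.getD i ' ')) := by
  apply List.ext_getElem
  · simp
  · intro i h1 h2
    simp at h1 ⊢
    simp [List.getElem?_eq_getElem h1]

theorem pvProdA_eq (cs : List Char) (l : Nat) :
    pvProdA cs l = (List.range (cs.length ^ l)).map (pvDk cs l) := by
  induction l with
  | zero => simp [pvProdA, pvDk]
  | succ l ih =>
      rcases eq_or_ne cs [] with h | h
      · subst h
        rw [pvProdA_snoc]
        simp
      · have hn : 0 < cs.length := List.length_pos_iff.mpr h
        rw [pvProdA_snoc, ih, List.flatMap_map, pow_succ, pvRangeMulFlat, List.map_flatMap]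
        congr 1
        funext q
        rw [pvMapGetD cs (fun c => pvDk cs l q ++ [c]), List.map_map]
        apply List.map_congr_left
        intro i hi
        simp only [List.mem_range] at hi
        show pvDk cs l q ++ [cs.getD i ' '] = pvDk cs (l+1) (q * cs.length + i)
        have hdiv : (q * cs.length + i) / cs.length = q := by
          rw [mul_comm, Nat.mul_add_div hn, Nat.div_eq_of_lt hi]; omega
        have hmod : (q * cs.length + i) % cs.length = i := by
          rw [mul_comm, Nat.mul_add_mod, Nat.mod_eq_of_lt hi]
        show _ = pvDk cs l ((q * cs.length + i) / cs.length) ++ [cs.getD ((q * cs.length + i) % cs.length) ' ']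
        rw [hdiv, hmod]

theorem pvDk_length (cs : List Char) (l : Nat) (r : Nat) : (pvDk cs l r).length = l := by
  induction l generalizing r with
  | zero => simp [pvDk]
  | succ l ih => simp [pvDk, ih]

theorem pvDk_mem (cs : List Char) (hn : 0 < cs.length) (l : Nat) (r : Nat) :
    ∀ x ∈ pvDk cs l r, x ∈ cs := by
  induction l generalizing r with
  | zero => simp [pvDk]
  | succ l ih =>
      intro x hx
      rw [pvDk, List.mem_append] at hx
      rcases hx with hx | hx
      · exact ih _ x hx
      · have hlt : r % cs.length < cs.length := Nat.mod_lt _ hn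
        rw [List.mem_singleton] at hx
        subst hx
        rw [List.getD_eq_getElem cs ' ' hlt]
        exact List.getElem_mem _

theorem pvLsb_reverse (cs : List Char) (l : Nat) (r : Nat) :
    (pvLsb cs l r).reverse = pvDk cs l r := by
  induction l generalizing r with
  | zero => simp [pvLsb, pvDk]
  | succ l ih => simp [pvLsb, pvDk, ih]

theorem pvIdx_min (cs : List Char) (c : Char) : ∀ i, i < cs.length → cs[i]? = some c → cs.idxOf c ≤ i := by
  induction cs with
  | nil => simp
  | cons a t ih =>
      intro i hi he
      rcases eq_or_ne a c with rfl | hne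
      · simp [List.idxOf_cons_self]
      · cases i with
        | zero => simp at he; exact absurd he hne
        | succ i =>
            rw [List.idxOf_cons_ne t hne]
            have := ih i (by simpa using hi) (by simpa using he)
            omega

theorem pvPrefixSingleton (c : Char) (t : List Char) : [c] <+: t ↔ t.head? = some c := by
  cases t with
  | nil => simp
  | cons a t => simp [List.cons_prefix_cons, eq_comm]

theorem pvFind_mem (charset : String) (c : Char) (h : c ∈ charset.toList) :
    PySem.Str.find charset (String.ofList [c]) = (charset.toList.idxOf c : Int) := by
  rw [PySem.Str.find_eq, String.toList_ofList]
  set cs := charset.toList with hcs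
  have hinf : [c] <:+: cs := (List.singleton_infix_iff c cs).mpr h
  have h0 : (0:Int) ≤ PySem.Chars.find cs [c] := (PySem.Chars.find_nonneg_iff cs [c]).mpr hinf
  obtain ⟨hpre, hmin⟩ := PySem.Chars.find_spec h0
  set F := (PySem.Chars.find cs [c]).toNat with hF
  have hget : cs[F]? = some c := by
    rw [← List.head?_drop]
    exact (pvPrefixSingleton c _).mp hpre
  have hFlt : F < cs.length := (List.getElem?_eq_some_iff.mp hget).1
  have hle : cs.idxOf c ≤ F := pvIdx_min cs c F hFlt hget
  have hge : F ≤ cs.idxOf c := by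
    by_contra hlt
    push Not at hlt
    apply hmin (cs.idxOf c) hlt
    rw [pvPrefixSingleton, List.head?_drop]
    rw [List.getElem?_eq_getElem (List.idxOf_lt_length_of_mem h)]
    rw [List.getElem_idxOf (List.idxOf_lt_length_of_mem h)]
  have : F = cs.idxOf c := le_antisymm hge hle
  rw [← this, hF, Int.toNat_of_nonneg h0]

theorem pvFind_not_mem (charset : String) (c : Char) (h : c ∉ charset.toList) :
    PySem.Str.find charset (String.ofList [c]) = -1 := by
  rw [PySem.Str.find_eq, String.toList_ofList]
  exact (PySem.Chars.find_eq_neg_one_iff _ _).mpr (fun hinf => h ((List.singleton_infix_iff c _).mp hinf))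

-- ---- A-side inner fold ----

theorem pvFoldA_true (sk : Option String) (ts : List (List Char)) :
    ∀ acc, ts.foldl (pvStepA sk) (true, acc) = (true, acc ++ ts.map String.ofList) := by
  induction ts with
  | nil => simp
  | cons t ts ih =>
      intro acc
      rw [List.foldl_cons]
      have h : pvStepA sk (true, acc) t = (true, acc ++ [String.ofList t]) := by
        simp [pvStepA]
      rw [h, ih]
      simp

theorem pvFoldA_false_nomatch (sk : Option String) (ts : List (List Char))
    (h : ∀ t ∈ ts, sk ≠ some (String.ofList t)) :
    ∀ acc, ts.foldl (pvStepA sk) (false, acc) = (false, acc) := by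
  induction ts with
  | nil => simp
  | cons t ts ih =>
      intro acc
      rw [List.foldl_cons]
      have hstep : pvStepA sk (false, acc) t = (false, acc) := by
        simp [pvStepA, h t (by simp)]
      rw [hstep]
      exact ih (fun t ht => h t (by simp [ht])) acc

theorem pvFoldA_found (sk : Option String) (ys : List (List Char)) (m : List Char) (zs : List (List Char))
    (hy : ∀ t ∈ ys, sk ≠ some (String.ofList t)) (hm : sk = some (String.ofList m)) :
    ∀ acc, (ys ++ m :: zs).foldl (pvStepA sk) (false, acc) = (true, acc ++ zs.map String.ofList) := by
  intro acc
  rw [List.foldl_append, pvFoldA_false_nomatch sk ys hy acc, List.foldl_cons]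
  have hstep : pvStepA sk (false, acc) m = (true, acc) := by
    simp [pvStepA, hm]
  rw [hstep, pvFoldA_true]

-- ---- A-side outer fold ----

theorem pvFoldOutA_true (charset : String) (sk : Option String) (b : Int) :
    ∀ (k : Nat) (a : Int), 0 ≤ a → k = (b - a).toNat → ∀ acc,
      (PySem.List.pyRange a b 1).foldl
        (fun st length => (pvProdA charset.toList length.toNat).foldl (pvStepA sk) st) (true, acc)
      = (true, acc ++ pvBlocks charset.toList a k 0) := by
  intro k
  induction k with
  | zero =>
      intro a _ hk acc
      rw [PySem.List.pyRange_one_eq_nil (by omega)]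
      simp [pvBlocks]
  | succ k ih =>
      intro a ha hk acc
      have hab : a < b := by omega
      rw [PySem.List.pyRange_one_cons hab, List.foldl_cons, pvProdA_eq, pvFoldA_true,
        ih (a+1) (by omega) (by omega)]
      simp [pvBlocks, List.map_map, Function.comp]

theorem pvFoldOutA_false (charset : String) (sk : Option String) (b : Int) :
    ∀ (k : Nat) (a : Int), 0 ≤ a → k = (b - a).toNat →
      (∀ l : Int, a ≤ l → l < b → ∀ r, r < charset.toList.length ^ l.toNat →
          sk ≠ some (String.ofList (pvDk charset.toList l.toNat r))) →
      ∀ acc,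
      (PySem.List.pyRange a b 1).foldl
        (fun st length => (pvProdA charset.toList length.toNat).foldl (pvStepA sk) st) (false, acc)
      = (false, acc) := by
  intro k
  induction k with
  | zero =>
      intro a _ hk _ acc
      rw [PySem.List.pyRange_one_eq_nil (by omega)]
      simp
  | succ k ih =>
      intro a ha hk hno acc
      have hab : a < b := by omega
      rw [PySem.List.pyRange_one_cons hab, List.foldl_cons, pvProdA_eq]
      rw [pvFoldA_false_nomatch]
      · exact ih (a+1) (by omega) (by omega)
          (fun l hl1 hl2 r hr => hno l (by omega) hl2 r hr) acc
      · intro t ht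
        rw [List.mem_map] at ht
        obtain ⟨r, hr, rfl⟩ := ht
        rw [List.mem_range] at hr
        exact hno a le_rfl hab r hr

-- ---- B-side decode ----

theorem pvDecInner (charset : String) (hn : 0 < charset.toList.length) :
    ∀ (l : Nat) (digs : List Char) (r : Nat),
      ((List.range l).foldl
        (fun (st : List Char × Int) _ =>
          (st.1 ++ [(PySem.Str.pyGet? charset (PySem.Int.mod st.2 ((charset.toList.length : Nat) : Int))).getD ' '],
           PySem.Int.floordiv st.2 ((charset.toList.length : Nat) : Int)))
        (digs, (r : Int))).1
      = digs ++ (pvLsb charset.toList l r).reverse.reverse := by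
  intro l
  induction l with
  | zero => intro digs r; simp [pvLsb]
  | succ l ih =>
      intro digs r
      rw [List.range_succ_eq_map, List.foldl_cons, List.foldl_map]
      have hlt : r % charset.toList.length < charset.toList.length := Nat.mod_lt _ hn
      have hget : (PySem.Str.pyGet? charset ((r % charset.toList.length : Nat) : Int)).getD ' '
          = charset.toList.getD (r % charset.toList.length) ' ' := by
        rw [PySem.Str.pyGet?_eq,
          show PySem.Chars.pyGet? = PySem.List.pyGet? (α := Char) from rfl,
          PySem.List.pyGet?_natCast, List.getElem?_eq_getElem hlt,
          List.getD_eq_getElem _ _ hlt]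
        rfl
      rw [PySem.Int.mod_natCast, PySem.Int.floordiv_natCast, hget, ih]
      simp [pvLsb]

theorem pvDecodeB_eq (charset : String) (hn : 0 < charset.toList.length) (l r : Nat) :
    pvDecodeB charset ((charset.toList.length : Nat) : Int) l (r : Int)
      = String.ofList (pvDk charset.toList l r) := by
  show String.ofList _ = _
  rw [pvDecInner charset hn l [] r]
  simp [pvLsb_reverse]

-- ---- range bookkeeping ----

theorem pvRangeDrop (N r0 : Nat) :
    (List.range N).drop r0 = (List.range (N - r0)).map (fun k => r0 + k) := by
  by_cases h : r0 ≤ N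
  · conv_lhs => rw [show N = r0 + (N - r0) by omega, List.range_add]
    exact List.drop_left' (by simp)
  · replace h : N < r0 := by omega
    rw [List.drop_eq_nil_of_le (by simpa using h.le), show N - r0 = 0 by omega]
    simp

theorem pvRangeSplit3 (R N : Nat) (h : R < N) :
    List.range N = List.range R ++ R :: (List.range (N - (R+1))).map (fun k => R+1+k) := by
  conv_lhs => rw [show N = (R+1) + (N - (R+1)) by omega, List.range_add, List.range_succ]
  simp

theorem pvPyRangeMap {β : Type} (N : Nat) (r0 : Int) (hr0 : 0 ≤ r0) (f : Int → β) :
    (PySem.List.pyRange r0 (N : Int) 1).map f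
      = (List.range (N - r0.toNat)).map (fun k => f (((r0.toNat + k : Nat) : Int))) := by
  rw [PySem.List.pyRange_one]
  have h : (((N : Int)) - r0).toNat = N - r0.toNat := by omega
  rw [h, List.map_map]
  apply List.map_congr_left
  intro k _
  simp only [Function.comp]
  congr 1
  omega

-- ---- B-side outer fold ----

theorem pvFoldOutB (charset : String) (b : Int) :
    ∀ (k : Nat) (a : Int), 1 ≤ a → k = (b - a).toNat → ∀ (r0 : Int), 0 ≤ r0 → ∀ (acc : List String),
      ((PySem.List.pyRange a b 1).foldl
        (fun (st : Int × List String) length =>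
          (0, st.2 ++ (PySem.List.pyRange st.1 (((charset.toList.length : Nat) : Int) ^ length.toNat) 1).map
                (fun r => pvDecodeB charset ((charset.toList.length : Nat) : Int) length.toNat r)))
        (r0, acc)).2
      = acc ++ pvBlocks charset.toList a k r0.toNat := by
  intro k
  induction k with
  | zero =>
      intro a _ hk r0 _ acc
      rw [PySem.List.pyRange_one_eq_nil (by omega)]
      simp [pvBlocks]
  | succ k ih =>
      intro a ha hk r0 hr0 acc
      have hab : a < b := by omega
      rw [PySem.List.pyRange_one_cons hab, List.foldl_cons]
      have hcast : (((charset.toList.length : Nat) : Int)) ^ a.toNat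
          = (((charset.toList.length ^ a.toNat : Nat) : Nat) : Int) := by push_cast; ring
      rw [hcast, pvPyRangeMap _ r0 hr0]
      have hblock : (List.range (charset.toList.length ^ a.toNat - r0.toNat)).map
            (fun k => pvDecodeB charset ((charset.toList.length : Nat) : Int) a.toNat (((r0.toNat + k : Nat) : Int)))
          = ((List.range (charset.toList.length ^ a.toNat)).drop r0.toNat).map
            (fun r => String.ofList (pvDk charset.toList a.toNat r)) := by
        rw [pvRangeDrop, List.map_map]
        apply List.map_congr_left
        intro j hj
        rw [List.mem_range] at hj
        have hn : 0 < charset.toList.length := by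
          by_contra hz
          push Not at hz
          have h0 : charset.toList.length = 0 := by omega
          rw [h0, Nat.zero_pow (by omega : 0 < a.toNat)] at hj
          omega
        simp only [Function.comp]
        rw [pvDecodeB_eq charset hn]
      rw [hblock, ih (a+1) (by omega) (by omega) 0 le_rfl]
      simp [pvBlocks, List.append_assoc]

-- ---- rank computation (B) ----

theorem pvRankFold_some (charset : String) :
    ∀ (u : List Char), (∀ c ∈ u, c ∈ charset.toList) → ∀ (r : Nat),
      u.foldl (fun acc c =>
        match acc with
        | none => none
        | some r =>
          let i := PySem.Str.find charset (String.ofList [c])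
          if i < 0 then none else some (r * ((charset.toList.length : Nat) : Int) + i)) (some (r : Int))
      = some ((pvEncF charset.toList r u : Nat) : Int) := by
  intro u
  induction u with
  | nil => intro _ r; simp [pvEncF]
  | cons c u' ih =>
      intro hall r
      rw [List.foldl_cons]
      have hc : c ∈ charset.toList := hall c (by simp)
      have hfind : PySem.Str.find charset (String.ofList [c]) = (charset.toList.idxOf c : Int) :=
        pvFind_mem charset c hc
      have hstep : (match some ((r : Nat) : Int) with
          | none => none
          | some r =>
            let i := PySem.Str.find charset (String.ofList [c])
            if i < 0 then none else some (r * ((charset.toList.length : Nat) : Int) + i))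
          = some (((r * charset.toList.length + charset.toList.idxOf c : Nat) : Nat) : Int) := by
        simp only [hfind]
        rw [if_neg (by omega)]
        push_cast
        ring_nf
      rw [hstep, ih (fun d hd => hall d (by simp [hd]))]
      rfl

theorem pvRankFold_none (charset : String) :
    ∀ (u : List Char), (∃ c ∈ u, c ∉ charset.toList) → ∀ (acc : Option Int),
      u.foldl (fun acc c =>
        match acc with
        | none => none
        | some r =>
          let i := PySem.Str.find charset (String.ofList [c])
          if i < 0 then none else some (r * ((charset.toList.length : Nat) : Int) + i)) acc
      = none := by
  have hstays : ∀ (u : List Char),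
      u.foldl (fun acc c =>
        match acc with
        | none => none
        | some r =>
          let i := PySem.Str.find charset (String.ofList [c])
          if i < 0 then none else some (r * ((charset.toList.length : Nat) : Int) + i)) none
      = none := by
    intro u
    induction u with
    | nil => rfl
    | cons c u' ih => rw [List.foldl_cons]; exact ih
  intro u
  induction u with
  | nil => rintro ⟨c, hc, _⟩; simp at hc
  | cons c u' ih =>
      rintro ⟨d, hd, hdn⟩ acc
      rw [List.foldl_cons]
      cases acc with
      | none => exact hstays u'
      | some r =>
          rcases List.mem_cons.mp hd with rfl | hd'
          · have hfind : PySem.Str.find charset (String.ofList [d]) = -1 := pvFind_not_mem charset d hdn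
            simp only [hfind]
            rw [if_pos (by norm_num)]
            exact hstays u'
          · rcases em (c ∈ charset.toList) with hc | hc
            · have hfind : PySem.Str.find charset (String.ofList [c]) = (charset.toList.idxOf c : Int) :=
                pvFind_mem charset c hc
              simp only [hfind]
              rw [if_neg (by omega)]
              exact ih ⟨d, hd', hdn⟩ _
            · have hfind : PySem.Str.find charset (String.ofList [c]) = -1 := pvFind_not_mem charset c hc
              simp only [hfind]
              rw [if_pos (by norm_num)]
              exact hstays u'

theorem pvRankB_some (charset : String) (u : List Char) (hall : ∀ c ∈ u, c ∈ charset.toList) :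
    pvRankB charset ((charset.toList.length : Nat) : Int) u
      = some (((pvEncF charset.toList 0 u : Nat)) : Int) := by
  have h := pvRankFold_some charset u hall 0
  simp only [Nat.cast_zero] at h
  exact h

theorem pvRankB_none (charset : String) (u : List Char) (hbad : ∃ c ∈ u, c ∉ charset.toList) :
    pvRankB charset ((charset.toList.length : Nat) : Int) u = none :=
  pvRankFold_none charset u hbad (some 0)

-- ---- rank facts ----

theorem pvEncF_cons (cs : List Char) (r : Nat) (c : Char) (u : List Char) :
    pvEncF cs r (c :: u) = pvEncF cs (r * cs.length + cs.idxOf c) u := rfl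

theorem pvEncF_snoc (cs : List Char) (r : Nat) (v : List Char) (c : Char) :
    pvEncF cs r (v ++ [c]) = pvEncF cs r v * cs.length + cs.idxOf c := by
  simp [pvEncF, List.foldl_append]

theorem pvEncF_lt (cs : List Char) :
    ∀ (u : List Char), (∀ c ∈ u, c ∈ cs) → ∀ r, pvEncF cs r u < (r+1) * cs.length ^ u.length := by
  intro u
  induction u with
  | nil => intro _ r; simp [pvEncF]
  | cons c u' ih =>
      intro hall r
      have hc : c ∈ cs := hall c (by simp)
      have hn : 0 < cs.length := List.length_pos_iff.mpr (by rintro rfl; simp at hc)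
      have hidx : cs.idxOf c < cs.length := List.idxOf_lt_length_of_mem hc
      rw [pvEncF_cons]
      have h1 := ih (fun d hd => hall d (by simp [hd])) (r * cs.length + cs.idxOf c)
      have h2 : (r * cs.length + cs.idxOf c + 1) * cs.length ^ u'.length
          ≤ ((r+1) * cs.length) * cs.length ^ u'.length := by
        apply Nat.mul_le_mul_right
        have : (r+1) * cs.length = r * cs.length + cs.length := by ring
        omega
      calc pvEncF cs (r * cs.length + cs.idxOf c) u'
          < (r * cs.length + cs.idxOf c + 1) * cs.length ^ u'.length := h1
        _ ≤ ((r+1) * cs.length) * cs.length ^ u'.length := h2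
        _ = (r+1) * cs.length ^ (c :: u').length := by
            simp [List.length_cons, pow_succ]; ring

theorem pvDk_encF (cs : List Char) :
    ∀ (u : List Char), (∀ c ∈ u, c ∈ cs) → pvDk cs u.length (pvEncF cs 0 u) = u := by
  intro u
  induction u using List.reverseRecOn with
  | nil => simp [pvEncF, pvDk]
  | append_singleton v c ih =>
      intro hall
      have hc : c ∈ cs := hall c (by simp)
      have hn : 0 < cs.length := List.length_pos_iff.mpr (by rintro rfl; simp at hc)
      have hidx : cs.idxOf c < cs.length := List.idxOf_lt_length_of_mem hc
      rw [pvEncF_snoc, show (v ++ [c]).length = v.length + 1 by simp]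
      show pvDk cs v.length ((pvEncF cs 0 v * cs.length + cs.idxOf c) / cs.length)
          ++ [cs.getD ((pvEncF cs 0 v * cs.length + cs.idxOf c) % cs.length) ' '] = v ++ [c]
      have hdiv : (pvEncF cs 0 v * cs.length + cs.idxOf c) / cs.length = pvEncF cs 0 v := by
        rw [mul_comm, Nat.mul_add_div hn, Nat.div_eq_of_lt hidx]; omega
      have hmod : (pvEncF cs 0 v * cs.length + cs.idxOf c) % cs.length = cs.idxOf c := by
        rw [mul_comm, Nat.mul_add_mod, Nat.mod_eq_of_lt hidx]
      rw [hdiv, hmod, ih (fun d hd => hall d (by simp [hd]))]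
      rw [List.getD_eq_getElem cs ' ' hidx, List.getElem_idxOf hidx]

theorem pvMinRank (cs : List Char) :
    ∀ (u : List Char), (∀ c ∈ u, c ∈ cs) → ∀ r', pvDk cs u.length r' = u → pvEncF cs 0 u ≤ r' := by
  intro u
  induction u using List.reverseRecOn with
  | nil => intro _ r' _; simp [pvEncF]
  | append_singleton v c ih =>
      intro hall r' heq
      have hc : c ∈ cs := hall c (by simp)
      have hn : 0 < cs.length := List.length_pos_iff.mpr (by rintro rfl; simp at hc)
      rw [show (v ++ [c]).length = v.length + 1 by simp] at heq
      have heq' : pvDk cs v.length (r' / cs.length) ++ [cs.getD (r' % cs.length) ' '] = v ++ [c] := heq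
      obtain ⟨h1, h2⟩ := List.append_inj heq' (by rw [pvDk_length])
      have hlt : r' % cs.length < cs.length := Nat.mod_lt _ hn
      have hgetc : cs[r' % cs.length]? = some c := by
        rw [List.getElem?_eq_getElem hlt]
        have : cs.getD (r' % cs.length) ' ' = c := by simpa using h2
        rw [← this, List.getD_eq_getElem cs ' ' hlt]
      have hidxle : cs.idxOf c ≤ r' % cs.length := pvIdx_min cs c _ hlt hgetc
      have hih : pvEncF cs 0 v ≤ r' / cs.length := ih (fun d hd => hall d (by simp [hd])) _ h1
      rw [pvEncF_snoc]
      have hdm : cs.length * (r' / cs.length) + r' % cs.length = r' := Nat.div_add_mod r' cs.length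
      have h3 : pvEncF cs 0 v * cs.length ≤ (r' / cs.length) * cs.length :=
        Nat.mul_le_mul_right _ hih
      have h4 : (r' / cs.length) * cs.length = cs.length * (r' / cs.length) := Nat.mul_comm _ _
      omega

-- ===== main proof =====

theorem generate_all_keys_spec : Claim_equal_generate_all_keys := by
  intro charset max_len start_key _
  unfold Spec_generate_all_keys generate_all_keys generate_all_keys_alt
  rw [PySem.Str.len_eq]
  cases start_key with
  | none =>
      simp only [Option.isNone_none, pvStartB]
      rw [pvFoldOutA_true charset none (max_len+1) ((max_len+1-1)).toNat 1 (by omega) rfl []]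
      rw [pvFoldOutB charset (max_len+1) ((max_len+1-1)).toNat 1 (by omega) rfl 0 le_rfl []]
      simp
  | some s =>
      simp only [Option.isNone_some, pvStartB, PySem.Str.len_eq]
      by_cases hlen : 1 ≤ (s.toList.length : Int) ∧ (s.toList.length : Int) ≤ max_len
      · obtain ⟨hlen1, hlen2⟩ := hlen
        rw [if_neg (by push Not; omega)]
        by_cases hallmem : ∀ c ∈ s.toList, c ∈ charset.toList
        · -- valid start key: A skips to it, B jumps directly to its rank
          have hne : s.toList ≠ [] := by
            intro h0
            rw [h0] at hlen1
            simp at hlen1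
          have hn : 0 < charset.toList.length := by
            obtain ⟨c, hcmem⟩ := List.exists_mem_of_ne_nil _ hne
            have hcin := hallmem c hcmem
            exact List.length_pos_iff.mpr (by rintro h0; rw [h0] at hcin; simp at hcin)
          have hRlt : pvEncF charset.toList 0 s.toList
              < charset.toList.length ^ s.toList.length := by
            have := pvEncF_lt charset.toList s.toList hallmem 0
            simpa using this
          have hdkR : pvDk charset.toList s.toList.length (pvEncF charset.toList 0 s.toList)
              = s.toList := pvDk_encF charset.toList s.toList hallmem
          rw [pvRankB_some charset s.toList hallmem]
          -- A: split the length range at s's length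
          rw [PySem.List.pyRange_one_append 1 (s.toList.length : Int) (max_len+1)
            (by omega) (by omega), List.foldl_append]
          rw [pvFoldOutA_false charset (some s) (s.toList.length : Int)
            (((s.toList.length : Int))-1).toNat 1 (by omega) rfl
            (by
              intro l hl1 hl2 r _ hEq
              have hEq' : s.toList = pvDk charset.toList l.toNat r := by
                have := congrArg String.toList (Option.some.inj hEq)
                simpa using this
              have hll : s.toList.length = l.toNat := by rw [hEq', pvDk_length]
              omega) []]
          rw [PySem.List.pyRange_one_cons (by omega : (s.toList.length : Int) < max_len+1),
            List.foldl_cons, pvProdA_eq, Int.toNat_natCast]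
          rw [pvRangeSplit3 (pvEncF charset.toList 0 s.toList)
            (charset.toList.length ^ s.toList.length) hRlt, List.map_append, List.map_cons]
          rw [pvFoldA_found (some s)
            ((List.range (pvEncF charset.toList 0 s.toList)).map (pvDk charset.toList s.toList.length))
            (pvDk charset.toList s.toList.length (pvEncF charset.toList 0 s.toList))
            (((List.range (charset.toList.length ^ s.toList.length - (pvEncF charset.toList 0 s.toList + 1))).map
                (fun k => pvEncF charset.toList 0 s.toList + 1 + k)).map (pvDk charset.toList s.toList.length))
            (by
              intro t ht hEq
              rw [List.mem_map] at ht
              obtain ⟨r, hr, rfl⟩ := ht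
              rw [List.mem_range] at hr
              have hEq' : pvDk charset.toList s.toList.length r = s.toList := by
                have h2 := congrArg String.toList (Option.some.inj hEq)
                rw [String.toList_ofList] at h2
                exact h2.symm
              have := pvMinRank charset.toList s.toList hallmem r hEq'
              omega)
            (by rw [hdkR, String.ofList_toList]) []]
          rw [pvFoldOutA_true charset (some s) (max_len+1)
            (max_len - (s.toList.length : Int)).toNat ((s.toList.length : Int)+1)
            (by omega) (by omega)]
          -- B side: reduce the match on the computed resume point, then one fold lemma
          show _ =
            ((PySem.List.pyRange ((s.toList.length : Int)) (max_len + 1) 1).foldl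
              (fun (st : Int × List String) length =>
                (0, st.2 ++ (PySem.List.pyRange st.1 (((charset.toList.length : Nat) : Int) ^ length.toNat) 1).map
                      (fun r => pvDecodeB charset ((charset.toList.length : Nat) : Int) length.toNat r)))
              (((pvEncF charset.toList 0 s.toList : Nat) : Int) + 1, [])).2
          rw [pvFoldOutB charset (max_len+1) (max_len+1-(s.toList.length : Int)).toNat
            (s.toList.length : Int) (by omega) rfl
            (((pvEncF charset.toList 0 s.toList : Nat) : Int)+1) (by omega) []]
          rw [show ((((pvEncF charset.toList 0 s.toList : Nat) : Int))+1).toNat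
              = pvEncF charset.toList 0 s.toList + 1 by omega]
          rw [show (max_len+1-(s.toList.length : Int)).toNat
              = (max_len - (s.toList.length : Int)).toNat + 1 by omega]
          show (List.map String.ofList _) ++ pvBlocks charset.toList ((s.toList.length : Int)+1) _ 0
              = [] ++ pvBlocks charset.toList (s.toList.length : Int) _ _
          rw [pvBlocks, Int.toNat_natCast,
            pvRangeDrop (charset.toList.length ^ s.toList.length) (pvEncF charset.toList 0 s.toList + 1)]
          simp [List.map_map, Function.comp]
        · -- some character of start_key is not in charset: both yield nothing
          push Not at hallmem
          obtain ⟨cbad, hcbad, hcbadn⟩ := hallmem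
          rw [pvRankB_none charset s.toList ⟨cbad, hcbad, hcbadn⟩]
          rw [pvFoldOutA_false charset (some s) (max_len+1) ((max_len+1-1)).toNat 1 (by omega) rfl
            (by
              intro l hl1 hl2 r hr hEq
              have hEq' : s.toList = pvDk charset.toList l.toNat r := by
                have := congrArg String.toList (Option.some.inj hEq)
                simpa using this
              have hnl : 0 < charset.toList.length := by
                by_contra hz
                push Not at hz
                have h0 : charset.toList.length = 0 := by omega
                rw [h0, Nat.zero_pow (by omega : 0 < l.toNat)] at hr
                omega
              exact hcbadn (pvDk_mem charset.toList hnl l.toNat r cbad (hEq' ▸ hcbad))) []]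
      · -- start_key length outside [1, max_len]: both yield nothing
        rw [if_pos (by omega)]
        rw [pvFoldOutA_false charset (some s) (max_len+1) ((max_len+1-1)).toNat 1 (by omega) rfl
          (by
            intro l hl1 hl2 r _ hEq
            have hEq' : s.toList = pvDk charset.toList l.toNat r := by
              have := congrArg String.toList (Option.some.inj hEq)
              simpa using this
            have hll : s.toList.length = l.toNat := by rw [hEq', pvDk_length]
            omega) []]
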